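-- pv_equiv track=rewrite | github.com/hamayoshitake/nutrition-ai-app | backend/functions/function_tools/evaluate_nutrition_search_tool.py | _analyze_modifiers
-- ===== SOURCE A (Python) =====
-- from typing import Any, Dict, List, Optional
--
-- def _analyze_modifiers(words: List[str]) -> Dict[str, List[str]]:
--     """修飾語の詳細分析"""
--
--     modifiers = {
--         "cooking_method": [],
--         "preparation": [],
--         "part": [],
--         "quality": [],
--         "size": []
--     }
--
--     # 調理方法
--     cooking_methods = ["raw", "cooked", "baked", "grilled", "fried", "boiled", "steamed", "roasted"]
--     modifiers["cooking_method"] = [word for word in words if word in cooking_methods]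
--
--     # 準備状態
--     preparations = ["skinless", "boneless", "peeled", "trimmed", "whole", "ground", "chopped"]
--     modifiers["preparation"] = [word for word in words if word in preparations]
--
--     # 部位
--     parts = ["breast", "thigh", "leg", "wing", "fillet", "loin", "shoulder"]
--     modifiers["part"] = [word for word in words if word in parts]
--
--     # 品質
--     qualities = ["fresh", "frozen", "organic", "lean", "fat-free", "low-fat"]
--     modifiers["quality"] = [word for word in words if word in qualities]
--
--     # サイズ
--     sizes = ["large", "medium", "small", "jumbo", "mini"]
--     modifiers["size"] = [word for word in words if word in sizes]
--
--     return modifiers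
-- ===== SOURCE B (Python) =====
-- from typing import Any, Dict, List, Optional
--
-- _CATEGORIES = [
--     ("cooking_method", ["raw", "cooked", "baked", "grilled", "fried", "boiled", "steamed", "roasted"]),
--     ("preparation", ["skinless", "boneless", "peeled", "trimmed", "whole", "ground", "chopped"]),
--     ("part", ["breast", "thigh", "leg", "wing", "fillet", "loin", "shoulder"]),
--     ("quality", ["fresh", "frozen", "organic", "lean", "fat-free", "low-fat"]),
--     ("size", ["large", "medium", "small", "jumbo", "mini"]),
-- ]
--
-- # one inverted index: modifier word -> category name
-- _INDEX = {w: cat for cat, ws in _CATEGORIES for w in ws}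
--
-- def _analyze_modifiers(words: List[str]) -> Dict[str, List[str]]:
--     """修飾語の詳細分析 (single index-driven pass)"""
--     tagged = [(_INDEX[w], w) for w in words if w in _INDEX]
--     result = {cat: [] for cat, _ in _CATEGORIES}
--     for cat, w in tagged:
--         result[cat].append(w)
--     return result
-- ===== Notes on version B (the rewrite author's own statement) =====
-- stated objective: faster
-- what changed: Replaces A's five separate scans of words (one list comprehension per category constant, each doing a linear scan of the category list per word) with a one-time inverted index mapping each modifier word to its category and a single index-driven pass appending each word to its bucket.
import Mathlib
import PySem

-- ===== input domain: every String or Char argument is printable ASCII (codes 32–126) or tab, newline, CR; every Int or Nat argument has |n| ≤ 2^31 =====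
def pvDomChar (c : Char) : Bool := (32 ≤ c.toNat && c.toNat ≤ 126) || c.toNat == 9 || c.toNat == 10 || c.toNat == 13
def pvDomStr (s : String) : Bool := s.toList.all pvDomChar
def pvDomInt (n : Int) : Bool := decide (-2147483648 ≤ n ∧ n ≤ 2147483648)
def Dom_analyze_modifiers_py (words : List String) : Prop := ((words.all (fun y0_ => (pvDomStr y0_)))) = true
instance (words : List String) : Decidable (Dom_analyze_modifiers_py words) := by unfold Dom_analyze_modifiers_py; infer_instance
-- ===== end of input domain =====

-- B replaces A's five separate scans of `words` (one per category list) by one inverted index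
-- word → category and a single index-driven pass; equal return value proved below (no mutation involved).

-- ===== PORT A =====
-- A: build the empty-bucket dict, then five list comprehensions, each scanning `words`
-- against one constant category list, assigned into the dict in order.
def analyze_modifiers_py (words : List String) : List (String × List String) :=
  ((((((PySem.Dict.ofList [("cooking_method", []), ("preparation", []), ("part", []), ("quality", []), ("size", [])]).insert
    "cooking_method" (words.filter (fun word => (["raw", "cooked", "baked", "grilled", "fried", "boiled", "steamed", "roasted"] : List String).contains word))).insert
    "preparation" (words.filter (fun word => (["skinless", "boneless", "peeled", "trimmed", "whole", "ground", "chopped"] : List String).contains word))).insert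
    "part" (words.filter (fun word => (["breast", "thigh", "leg", "wing", "fillet", "loin", "shoulder"] : List String).contains word))).insert
    "quality" (words.filter (fun word => (["fresh", "frozen", "organic", "lean", "fat-free", "low-fat"] : List String).contains word))).insert
    "size" (words.filter (fun word => (["large", "medium", "small", "jumbo", "mini"] : List String).contains word))).items

-- ===== PORT B =====
-- B (Source B): _CATEGORIES, the inverted index _INDEX = {w: cat …}, one tagging pass over
-- `words`, then one appending loop into the pre-initialised buckets.
def pvCategories : List (String × List String) :=
  [("cooking_method", ["raw", "cooked", "baked", "grilled", "fried", "boiled", "steamed", "roasted"]),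
   ("preparation", ["skinless", "boneless", "peeled", "trimmed", "whole", "ground", "chopped"]),
   ("part", ["breast", "thigh", "leg", "wing", "fillet", "loin", "shoulder"]),
   ("quality", ["fresh", "frozen", "organic", "lean", "fat-free", "low-fat"]),
   ("size", ["large", "medium", "small", "jumbo", "mini"])]

-- _INDEX = {w: cat for cat, ws in _CATEGORIES for w in ws}
def pvIndex : PySem.Dict String String :=
  pvCategories.foldl (fun d p => p.2.foldl (fun d w => d.insert w p.1) d) PySem.Dict.empty

-- one element of `tagged`: (_INDEX[w], w) if w in _INDEX else dropped
def pvTag (w : String) : Option (String × String) := (pvIndex.get? w).map (fun c => (c, w))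

-- the body of `for cat, w in tagged: result[cat].append(w)`
def pvStep (d : PySem.Dict String (List String)) (p : String × String) : PySem.Dict String (List String) :=
  d.modify p.1 [] (· ++ [p.2])

def analyze_modifiers_py_alt (words : List String) : List (String × List String) :=
  ((words.filterMap pvTag).foldl pvStep
    (pvCategories.foldl (fun d p => d.insert p.1 []) PySem.Dict.empty)).items

-- ===== PRECONDITION & SPEC =====
def Spec_analyze_modifiers_py (words : List String) (out : List (String × List String)) : Prop := out = analyze_modifiers_py_alt words
instance (words : List String) (out : List (String × List String)) : Decidable (Spec_analyze_modifiers_py words out) := by unfold Spec_analyze_modifiers_py; infer_instance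

-- ===== CLAIM (what is proved, stated in full; the proofs are below) =====
def Claim_equal_analyze_modifiers_py : Prop := ∀ (words : List String), Dom_analyze_modifiers_py words → Spec_analyze_modifiers_py words (analyze_modifiers_py words)

-- ===== LEMMAS AND PROOFS =====

-- pvTag on a word of each category list
set_option maxRecDepth 4096 in
lemma pvTag_cm (w : String) (h : w ∈ (["raw", "cooked", "baked", "grilled", "fried", "boiled", "steamed", "roasted"] : List String)) :
    pvTag w = some ("cooking_method", w) := by fin_cases h <;> rfl

set_option maxRecDepth 4096 in
lemma pvTag_prep (w : String) (h : w ∈ (["skinless", "boneless", "peeled", "trimmed", "whole", "ground", "chopped"] : List String)) :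
    pvTag w = some ("preparation", w) := by fin_cases h <;> rfl

set_option maxRecDepth 4096 in
lemma pvTag_part (w : String) (h : w ∈ (["breast", "thigh", "leg", "wing", "fillet", "loin", "shoulder"] : List String)) :
    pvTag w = some ("part", w) := by fin_cases h <;> rfl

set_option maxRecDepth 4096 in
lemma pvTag_qual (w : String) (h : w ∈ (["fresh", "frozen", "organic", "lean", "fat-free", "low-fat"] : List String)) :
    pvTag w = some ("quality", w) := by fin_cases h <;> rfl

set_option maxRecDepth 4096 in
lemma pvTag_size (w : String) (h : w ∈ (["large", "medium", "small", "jumbo", "mini"] : List String)) :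
    pvTag w = some ("size", w) := by fin_cases h <;> rfl

-- pvTag on a word in no category list
set_option maxRecDepth 4096 in
lemma pvTag_none (w : String)
    (h1 : w ∉ (["raw", "cooked", "baked", "grilled", "fried", "boiled", "steamed", "roasted"] : List String))
    (h2 : w ∉ (["skinless", "boneless", "peeled", "trimmed", "whole", "ground", "chopped"] : List String))
    (h3 : w ∉ (["breast", "thigh", "leg", "wing", "fillet", "loin", "shoulder"] : List String))
    (h4 : w ∉ (["fresh", "frozen", "organic", "lean", "fat-free", "low-fat"] : List String))
    (h5 : w ∉ (["large", "medium", "small", "jumbo", "mini"] : List String)) :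
    pvTag w = none := by
  have hk : pvIndex.get? w = none := by
    rw [PySem.Dict.get?_eq_none_iff_not_mem_keys]
    have e : pvIndex.keys = ["raw", "cooked", "baked", "grilled", "fried", "boiled", "steamed", "roasted", "skinless", "boneless", "peeled", "trimmed", "whole", "ground", "chopped", "breast", "thigh", "leg", "wing", "fillet", "loin", "shoulder", "fresh", "frozen", "organic", "lean", "fat-free", "low-fat", "large", "medium", "small", "jumbo", "mini"] := by rfl
    rw [e]
    simp only [List.mem_cons, List.not_mem_nil, or_false, not_or] at h1 h2 h3 h4 h5 ⊢
    simp_all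
  simp [pvTag, hk]

-- one pvStep on the five-bucket state, per category
lemma pvStep_cm (a1 a2 a3 a4 a5 : List String) (v : String) :
    pvStep (PySem.Dict.mk [("cooking_method", a1), ("preparation", a2), ("part", a3), ("quality", a4), ("size", a5)]) ("cooking_method", v)
      = PySem.Dict.mk [("cooking_method", a1 ++ [v]), ("preparation", a2), ("part", a3), ("quality", a4), ("size", a5)] := by rfl

lemma pvStep_prep (a1 a2 a3 a4 a5 : List String) (v : String) :
    pvStep (PySem.Dict.mk [("cooking_method", a1), ("preparation", a2), ("part", a3), ("quality", a4), ("size", a5)]) ("preparation", v)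
      = PySem.Dict.mk [("cooking_method", a1), ("preparation", a2 ++ [v]), ("part", a3), ("quality", a4), ("size", a5)] := by rfl

lemma pvStep_part (a1 a2 a3 a4 a5 : List String) (v : String) :
    pvStep (PySem.Dict.mk [("cooking_method", a1), ("preparation", a2), ("part", a3), ("quality", a4), ("size", a5)]) ("part", v)
      = PySem.Dict.mk [("cooking_method", a1), ("preparation", a2), ("part", a3 ++ [v]), ("quality", a4), ("size", a5)] := by rfl

lemma pvStep_qual (a1 a2 a3 a4 a5 : List String) (v : String) :
    pvStep (PySem.Dict.mk [("cooking_method", a1), ("preparation", a2), ("part", a3), ("quality", a4), ("size", a5)]) ("quality", v)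
      = PySem.Dict.mk [("cooking_method", a1), ("preparation", a2), ("part", a3), ("quality", a4 ++ [v]), ("size", a5)] := by rfl

lemma pvStep_size (a1 a2 a3 a4 a5 : List String) (v : String) :
    pvStep (PySem.Dict.mk [("cooking_method", a1), ("preparation", a2), ("part", a3), ("quality", a4), ("size", a5)]) ("size", v)
      = PySem.Dict.mk [("cooking_method", a1), ("preparation", a2), ("part", a3), ("quality", a4), ("size", a5 ++ [v])] := by rfl

-- the single tagged pass, started from arbitrary bucket contents, appends exactly A's five filters
lemma pv_main (ws : List String) : ∀ a1 a2 a3 a4 a5 : List String,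
    ((ws.filterMap pvTag).foldl pvStep
        (PySem.Dict.mk [("cooking_method", a1), ("preparation", a2), ("part", a3), ("quality", a4), ("size", a5)])).items
      = [("cooking_method", a1 ++ ws.filter (fun w => (["raw", "cooked", "baked", "grilled", "fried", "boiled", "steamed", "roasted"] : List String).contains w)),
         ("preparation", a2 ++ ws.filter (fun w => (["skinless", "boneless", "peeled", "trimmed", "whole", "ground", "chopped"] : List String).contains w)),
         ("part", a3 ++ ws.filter (fun w => (["breast", "thigh", "leg", "wing", "fillet", "loin", "shoulder"] : List String).contains w)),
         ("quality", a4 ++ ws.filter (fun w => (["fresh", "frozen", "organic", "lean", "fat-free", "low-fat"] : List String).contains w)),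
         ("size", a5 ++ ws.filter (fun w => (["large", "medium", "small", "jumbo", "mini"] : List String).contains w))] := by
  induction ws with
  | nil => intro a1 a2 a3 a4 a5; simp
  | cons w ws ih =>
    intro a1 a2 a3 a4 a5
    by_cases h1 : w ∈ (["raw", "cooked", "baked", "grilled", "fried", "boiled", "steamed", "roasted"] : List String)
    · simp only [List.filterMap_cons, pvTag_cm w h1, List.foldl_cons, pvStep_cm]
      rw [ih]
      simp only [List.mem_cons, List.not_mem_nil, or_false] at h1
      rcases h1 with rfl | rfl | rfl | rfl | rfl | rfl | rfl | rfl <;> simp [List.filter_cons]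
    · by_cases h2 : w ∈ (["skinless", "boneless", "peeled", "trimmed", "whole", "ground", "chopped"] : List String)
      · simp only [List.filterMap_cons, pvTag_prep w h2, List.foldl_cons, pvStep_prep]
        rw [ih]
        simp only [List.mem_cons, List.not_mem_nil, or_false] at h2
        rcases h2 with rfl | rfl | rfl | rfl | rfl | rfl | rfl <;> simp [List.filter_cons]
      · by_cases h3 : w ∈ (["breast", "thigh", "leg", "wing", "fillet", "loin", "shoulder"] : List String)
        · simp only [List.filterMap_cons, pvTag_part w h3, List.foldl_cons, pvStep_part]
          rw [ih]
          simp only [List.mem_cons, List.not_mem_nil, or_false] at h3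
          rcases h3 with rfl | rfl | rfl | rfl | rfl | rfl | rfl <;> simp [List.filter_cons]
        · by_cases h4 : w ∈ (["fresh", "frozen", "organic", "lean", "fat-free", "low-fat"] : List String)
          · simp only [List.filterMap_cons, pvTag_qual w h4, List.foldl_cons, pvStep_qual]
            rw [ih]
            simp only [List.mem_cons, List.not_mem_nil, or_false] at h4
            rcases h4 with rfl | rfl | rfl | rfl | rfl | rfl <;> simp [List.filter_cons]
          · by_cases h5 : w ∈ (["large", "medium", "small", "jumbo", "mini"] : List String)
            · simp only [List.filterMap_cons, pvTag_size w h5, List.foldl_cons, pvStep_size]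
              rw [ih]
              simp only [List.mem_cons, List.not_mem_nil, or_false] at h5
              rcases h5 with rfl | rfl | rfl | rfl | rfl <;> simp [List.filter_cons]
            · simp only [List.filterMap_cons, pvTag_none w h1 h2 h3 h4 h5]
              rw [ih]
              simp only [List.mem_cons, List.not_mem_nil, or_false, not_or] at h1 h2 h3 h4 h5
              obtain ⟨e1, e2, e3, e4, e5, e6, e7, e8⟩ := h1
              obtain ⟨f1, f2, f3, f4, f5, f6, f7⟩ := h2
              obtain ⟨g1, g2, g3, g4, g5, g6, g7⟩ := h3
              obtain ⟨k1, k2, k3, k4, k5, k6⟩ := h4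
              obtain ⟨m1, m2, m3, m4, m5⟩ := h5
              simp [List.filter_cons, e1, e2, e3, e4, e5, e6, e7, e8, f1, f2, f3, f4, f5, f6, f7,
                g1, g2, g3, g4, g5, g6, g7, k1, k2, k3, k4, k5, k6, m1, m2, m3, m4, m5]

-- ===== VERDICT (by name: the statement is the Claim_ definition above) =====
theorem analyze_modifiers_py_spec : Claim_equal_analyze_modifiers_py := by
  intro words _
  show analyze_modifiers_py words = analyze_modifiers_py_alt words
  unfold analyze_modifiers_py analyze_modifiers_py_alt
  rw [show (pvCategories.foldl (fun d p => d.insert p.1 []) PySem.Dict.empty)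
        = PySem.Dict.mk [("cooking_method", []), ("preparation", []), ("part", []), ("quality", []), ("size", [])] from rfl]
  rw [pv_main]
  simp only [List.nil_append]
  rfl
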